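-- pv_equiv track=rewrite | github.com/eloyhz/competitive-programming | tc-arg/contest-01/a_add_odd_or_subtract_even.py | add_odd_or_subtract_even
-- ===== SOURCE A (Python) =====
-- def add_odd_or_subtract_even(a, b):
-- 	counter = 0
-- 	while a != b:
-- 		if a < b:
-- 			diff = b - a
-- 			if diff % 2 != 0:
-- 				counter += 1
-- 				a += diff
-- 			else:
-- 				counter += 2
-- 				a += diff
-- 		else:
-- 			diff = a - b
-- 			if diff % 2 == 0:
-- 				counter += 1
-- 				b += diff
-- 			else:
-- 				counter += 2
-- 				b += diff
-- 	return counter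
-- ===== SOURCE B (Python) =====
-- def add_odd_or_subtract_even(a, b):
--     # Branchless arithmetical formulation: the answer is 0 when equal, otherwise
--     # 1 + parity of (a - b) shifted by whether a < b.
--     return 0 if a == b else 1 + ((a - b) + (a < b)) % 2
-- ===== Notes on version B (the rewrite author's own statement) =====
-- stated objective: simpler
-- what changed: Replaced A's while loop with its nested sign/parity branch tree by a single branchless arithmetic formula: 0 when equal, else 1 + ((a - b) + (a < b)) % 2, so no loop and no case analysis on sign or parity remains.
import Mathlib
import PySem

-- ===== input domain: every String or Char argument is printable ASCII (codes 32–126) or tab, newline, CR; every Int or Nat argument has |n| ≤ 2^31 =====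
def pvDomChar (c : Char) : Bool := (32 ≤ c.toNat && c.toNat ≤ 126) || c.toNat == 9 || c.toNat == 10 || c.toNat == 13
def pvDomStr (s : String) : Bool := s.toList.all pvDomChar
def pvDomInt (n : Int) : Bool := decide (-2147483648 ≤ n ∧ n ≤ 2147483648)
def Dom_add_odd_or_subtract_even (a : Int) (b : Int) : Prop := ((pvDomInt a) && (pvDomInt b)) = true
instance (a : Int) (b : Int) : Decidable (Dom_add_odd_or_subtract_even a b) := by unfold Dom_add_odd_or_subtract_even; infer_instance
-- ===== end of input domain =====

-- B replaces A's loop and its nested sign/parity branch tree by one branchless arithmetic formula; objective: simpler.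

-- ===== PORT A =====
-- Literal port of A's while loop. Each branch adds the full difference, so the
-- recursive call is always on equal arguments; measure: 0 if a = b else 1.
def aose_loop (a : Int) (b : Int) (counter : Int) : Int :=
  if a ≠ b then
    if a < b then
      let diff := b - a
      if PySem.Int.mod diff 2 ≠ 0 then
        aose_loop (a + diff) b (counter + 1)
      else
        aose_loop (a + diff) b (counter + 2)
    else
      let diff := a - b
      if PySem.Int.mod diff 2 = 0 then
        aose_loop a (b + diff) (counter + 1)
      else
        aose_loop a (b + diff) (counter + 2)
  else
    counter
termination_by (if a = b then 0 else 1 : Nat)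
decreasing_by all_goals simp_all

def add_odd_or_subtract_even (a : Int) (b : Int) : Int :=
  aose_loop a b 0

-- ===== PORT B =====
def add_odd_or_subtract_even_alt (a : Int) (b : Int) : Int :=
  if a = b then 0
  else 1 + PySem.Int.mod ((a - b) + (if a < b then 1 else 0)) 2

-- ===== PRECONDITION & SPEC =====
def Spec_add_odd_or_subtract_even (a : Int) (b : Int) (out : Int) : Prop := out = add_odd_or_subtract_even_alt a b
instance (a : Int) (b : Int) (out : Int) : Decidable (Spec_add_odd_or_subtract_even a b out) := by unfold Spec_add_odd_or_subtract_even; infer_instance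

-- ===== CLAIM =====
def Claim_equal_add_odd_or_subtract_even : Prop := ∀ (a : Int) (b : Int), Dom_add_odd_or_subtract_even a b → Spec_add_odd_or_subtract_even a b (add_odd_or_subtract_even a b)

-- ===== LEMMAS AND PROOFS =====

-- One unfolding of the loop on equal arguments returns the counter.
theorem aose_loop_eq (b counter : Int) : aose_loop b b counter = counter := by
  unfold aose_loop; simp

-- ===== VERDICT =====
theorem add_odd_or_subtract_even_spec : Claim_equal_add_odd_or_subtract_even := by
  intro a b _
  unfold Spec_add_odd_or_subtract_even add_odd_or_subtract_even add_odd_or_subtract_even_alt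
  unfold aose_loop
  by_cases hab : a = b
  · simp [hab]
  · have hne : a ≠ b := hab
    by_cases hlt : a < b
    · have hmod : PySem.Int.mod (b - a) 2 = (b - a) % 2 :=
        PySem.Int.mod_eq_emod_of_pos (by omega)
      have hmod' : PySem.Int.mod (a - b + 1) 2 = (a - b + 1) % 2 :=
        PySem.Int.mod_eq_emod_of_pos (by omega)
      simp only [hne, hlt, ite_not, hmod,
        show a + (b - a) = b by ring, aose_loop_eq]
      by_cases hp : (b - a) % 2 = 0
      · have : (a - b + 1) % 2 = 1 := by omega
        simp [hp, this]
      · have h1 : (b - a) % 2 = 1 := by omega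
        have : (a - b + 1) % 2 = 0 := by omega
        simp [hp, this]
    · have hmod : PySem.Int.mod (a - b) 2 = (a - b) % 2 :=
        PySem.Int.mod_eq_emod_of_pos (by omega)
      simp only [hne, hlt, if_false, ite_not, hmod,
        show b + (a - b) = a by ring, aose_loop_eq]
      by_cases hp : (a - b) % 2 = 0
      · simp [hp]
      · have h1 : (a - b) % 2 = 1 := by omega
        simp [h1]
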